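-- pv_equiv track=rewrite | github.com/hooong/2019-blind-2nd-elevator | example/1.py | is_bottom
-- ===== SOURCE A (Python) =====
-- def is_bottom(calls, passengers, floor):
--     bottom = 100
--     for call in calls:
--         bottom = min(bottom, call['start'])
--     for passenger in passengers:
--         bottom = min(bottom, passenger['end'])
--
--     if floor <= bottom:
--         return True
--     else:
--         return False
-- ===== SOURCE B (Python) =====
-- def is_bottom(calls, passengers, floor):
--     values = [100] + [c['start'] for c in calls] + [p['end'] for p in passengers]
--     values.sort()
--     return floor <= values[0]
-- ===== Notes on version B (the rewrite author's own statement) =====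
-- stated objective: alternative
-- what changed: B replaces the running-min fold by a sort-then-head strategy: it gathers the 100 seed and all start/end values into one list, sorts it, and compares floor with the first (smallest) element; it trades the O(n) scan for an O(n log n) sort in exchange for a flat, declarative pipeline.
import Mathlib
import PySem

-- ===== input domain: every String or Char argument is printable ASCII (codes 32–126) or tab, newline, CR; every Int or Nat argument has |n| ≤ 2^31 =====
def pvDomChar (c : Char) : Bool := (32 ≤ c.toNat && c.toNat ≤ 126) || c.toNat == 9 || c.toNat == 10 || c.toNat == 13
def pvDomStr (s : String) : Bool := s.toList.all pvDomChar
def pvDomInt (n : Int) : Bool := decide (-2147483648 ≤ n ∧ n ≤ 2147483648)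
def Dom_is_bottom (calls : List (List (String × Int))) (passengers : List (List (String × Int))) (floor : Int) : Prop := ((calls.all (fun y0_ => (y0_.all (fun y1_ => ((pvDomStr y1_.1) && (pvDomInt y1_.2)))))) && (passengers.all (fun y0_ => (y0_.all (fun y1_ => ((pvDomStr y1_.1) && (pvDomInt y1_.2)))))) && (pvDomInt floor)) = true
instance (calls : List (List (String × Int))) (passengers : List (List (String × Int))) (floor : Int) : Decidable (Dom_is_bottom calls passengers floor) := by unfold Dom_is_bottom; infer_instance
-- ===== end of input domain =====

-- B replaces A's running-min fold by a sort-then-head pipeline (collect 100 and all start/end values, sort, compare floor with the first element); return value only.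

-- dict lookup d[k]: first match in the association list (KeyError = none, excluded by Pre_)
def pvLookup (d : List (String × Int)) (k : String) : Option Int := (List.lookup k d)

-- ===== PORT A =====
def is_bottom (calls : List (List (String × Int))) (passengers : List (List (String × Int))) (floor : Int) : Bool :=
  let bottom : Int := 100
  let bottom := calls.foldl (fun b call => min b ((pvLookup call "start").getD 0)) bottom
  let bottom := passengers.foldl (fun b passenger => min b ((pvLookup passenger "end").getD 0)) bottom
  if floor ≤ bottom then true else false

-- ===== PORT B =====
def is_bottom_alt (calls : List (List (String × Int))) (passengers : List (List (String × Int))) (floor : Int) : Bool :=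
  let values : List Int :=
    100 :: (calls.map (fun c => (pvLookup c "start").getD 0)
            ++ passengers.map (fun p => (pvLookup p "end").getD 0))
  let values := PySem.List.sorted values (fun x => x) false
  -- values[0]: the list is nonempty (it contains the 100 seed), so the total form is exact here
  decide (floor ≤ PySem.List.pyGetD values 0 0)

-- ===== PRECONDITION & SPEC =====
-- Pre_ excludes exactly the inputs where Python A raises KeyError: a call without key "start" or a passenger without key "end".
def Pre_is_bottom (calls : List (List (String × Int))) (passengers : List (List (String × Int))) (floor : Int) : Prop :=  -- floor unused: KeyError depends only on the dict keys
  (calls.all (fun call => (pvLookup call "start").isSome)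
    && passengers.all (fun passenger => (pvLookup passenger "end").isSome)) = true
instance (calls : List (List (String × Int))) (passengers : List (List (String × Int))) (floor : Int) : Decidable (Pre_is_bottom calls passengers floor) := by unfold Pre_is_bottom; infer_instance

def pvWitness_is_bottom : (List (List (String × Int))) × (List (List (String × Int))) × Int :=
  ([[("start", 3)]], [[("end", 5)]], 2)

def Spec_is_bottom (calls : List (List (String × Int))) (passengers : List (List (String × Int))) (floor : Int) (out : Bool) : Prop := out = is_bottom_alt calls passengers floor
instance (calls : List (List (String × Int))) (passengers : List (List (String × Int))) (floor : Int) (out : Bool) : Decidable (Spec_is_bottom calls passengers floor out) := by unfold Spec_is_bottom; infer_instance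

-- ===== CLAIM (what is proved, stated in full; the proofs are below) =====
def Claim_equal_is_bottom : Prop := ∀ (calls : List (List (String × Int))) (passengers : List (List (String × Int))) (floor : Int), Dom_is_bottom calls passengers floor → Pre_is_bottom calls passengers floor → Spec_is_bottom calls passengers floor (is_bottom calls passengers floor)

-- ===== LEMMAS AND PROOFS =====

-- being below a running min is being below the seed and every element
lemma le_foldl_min_iff (f : Int) (xs : List Int) : ∀ b : Int,
    f ≤ xs.foldl min b ↔ f ≤ b ∧ ∀ x ∈ xs, f ≤ x := by
  induction xs with
  | nil => intro b; simp
  | cons x xs ih =>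
      intro b
      rw [List.foldl_cons, ih (min b x)]
      simp only [le_min_iff, List.mem_cons]
      constructor
      · rintro ⟨⟨hb, hx⟩, hrest⟩
        exact ⟨hb, fun y hy => hy.elim (fun h => h ▸ hx) (hrest y)⟩
      · rintro ⟨hb, hall⟩
        exact ⟨⟨hb, hall x (Or.inl rfl)⟩, fun y hy => hall y (Or.inr hy)⟩

-- ===== VERDICT (by name: the statement is the Claim_ definition above) =====
theorem is_bottom_spec : Claim_equal_is_bottom := by
  intro calls passengers floor _ _
  unfold Spec_is_bottom is_bottom is_bottom_alt
  simp only []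
  set vs : List Int :=
    100 :: (calls.map (fun c => (pvLookup c "start").getD 0)
            ++ passengers.map (fun p => (pvLookup p "end").getD 0)) with hvs
  set s := PySem.List.sorted vs (fun x => x) false with hs
  -- the sorted list is nonempty (vs contains the seed), so name its head
  have hne : s ≠ [] := by
    intro h
    rw [hs] at h
    exact absurd ((PySem.List.sorted_eq_nil_iff vs (fun x => x) false).1 h) (by simp [hvs])
  obtain ⟨m, t, hst⟩ := List.exists_cons_of_ne_nil hne
  have hsort : PySem.List.sorted vs (fun x => x) false = m :: t := hs.symm.trans hst
  have hmem : m ∈ vs := (PySem.List.mem_sorted vs (fun x => x) false m).1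
    (by rw [← hs, hst]; exact List.mem_cons_self ..)
  have hmin : ∀ y ∈ vs, m ≤ y := by
    have := PySem.List.key_head_sorted_le (h := hsort)
    simpa using this
  have hhead : PySem.List.pyGetD s 0 0 = m := by
    rw [hst]; exact PySem.List.pyGetD_zero_cons ..
  rw [hhead]
  -- both sides say: floor ≤ every element of vs
  have hA : (floor ≤
      (passengers.foldl (fun b passenger => min b ((pvLookup passenger "end").getD 0))
        (calls.foldl (fun b call => min b ((pvLookup call "start").getD 0)) 100)))
      ↔ ∀ y ∈ vs, floor ≤ y := by
    rw [← List.foldl_map (f := fun p => (pvLookup p "end").getD 0) (g := min),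
        ← List.foldl_map (f := fun c => (pvLookup c "start").getD 0) (g := min),
        le_foldl_min_iff, le_foldl_min_iff]
    simp only [hvs, List.mem_cons, List.mem_append]
    constructor
    · rintro ⟨⟨h100, hc⟩, hp⟩ y hy
      rcases hy with rfl | hy | hy
      · exact h100
      · exact hc y hy
      · exact hp y hy
    · intro h
      exact ⟨⟨h 100 (Or.inl rfl), fun y hy => h y (Or.inr (Or.inl hy))⟩,
             fun y hy => h y (Or.inr (Or.inr hy))⟩
  have hB : (floor ≤ m) ↔ ∀ y ∈ vs, floor ≤ y :=
    ⟨fun h y hy => le_trans h (hmin y hy), fun h => h m hmem⟩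
  by_cases h : ∀ y ∈ vs, floor ≤ y
  · rw [if_pos (hA.2 h), decide_eq_true (hB.2 h)]
  · rw [if_neg (fun hc => h (hA.1 hc)), decide_eq_false (fun hc => h (hB.1 hc))]
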